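-- pv_equiv track=rewrite | github.com/regulondbunam/RegulonDB-Datamarts | src/datamarts/domain/downloadableFiles_datamart/tfgene_file.py | remove_similar_items
-- ===== SOURCE A (Python) =====
-- def remove_similar_items(lista):
--     resultado = []
--     omitir = set()
--     for cadena in lista:
--         inicio = cadena[:-1]
--         if inicio not in omitir:
--             resultado.append(cadena)
--             omitir.add(inicio)
--     return resultado
-- ===== SOURCE B (Python) =====
-- def remove_similar_items(lista):
--     resultado = []
--     pendientes = lista
--     while pendientes:
--         cadena = pendientes[0]
--         inicio = cadena[:-1]
--         resultado.append(cadena)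
--         pendientes = [c for c in pendientes[1:] if c[:-1] != inicio]
--     return resultado
-- ===== Notes on version B (the rewrite author's own statement) =====
-- stated objective: alternative
-- what changed: Replaces the seen-set single pass with a sieve: repeatedly take the first remaining string and filter out every later string sharing its prefix, so no membership set or seen-structure exists at all.
import Mathlib
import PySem

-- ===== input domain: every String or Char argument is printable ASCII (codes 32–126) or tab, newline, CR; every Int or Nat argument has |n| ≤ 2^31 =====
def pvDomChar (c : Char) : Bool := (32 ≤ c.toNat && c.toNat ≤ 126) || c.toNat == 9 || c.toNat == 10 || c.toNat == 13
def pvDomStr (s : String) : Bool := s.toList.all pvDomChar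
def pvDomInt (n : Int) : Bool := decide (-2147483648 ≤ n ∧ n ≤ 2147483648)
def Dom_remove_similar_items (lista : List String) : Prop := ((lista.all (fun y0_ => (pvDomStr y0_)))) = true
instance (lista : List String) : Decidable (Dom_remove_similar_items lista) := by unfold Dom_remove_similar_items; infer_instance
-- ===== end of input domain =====

-- B replaces the seen-set single pass with a sieve: repeatedly keep the first remaining
-- string and filter out all later strings with the same prefix (alternative, not faster).

-- shared helper: Python's cadena[:-1]
def pvPre (c : String) : String := PySem.Str.slice c none (some (-1))

-- ===== PORT A =====
def pvStepA (st : List String × PySem.Set String) (cadena : String) :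
    List String × PySem.Set String :=
  let inicio := pvPre cadena
  if !(PySem.Set.contains st.2 inicio) then (st.1 ++ [cadena], PySem.Set.add st.2 inicio)
  else st

def remove_similar_items (lista : List String) : List String :=
  (lista.foldl pvStepA ([], PySem.Set.empty)).1

-- ===== PORT B =====
-- while loop on 'pendientes' carrying the accumulator 'resultado'
def pvLoopB (resultado : List String) (pendientes : List String) : List String :=
  match pendientes with
  | [] => resultado
  | cadena :: rest =>
    pvLoopB (resultado ++ [cadena]) (rest.filter (fun c => pvPre c != pvPre cadena))
termination_by pendientes.length
decreasing_by
  simp only [List.length_cons, List.length_unattach]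
  exact Nat.lt_succ_of_le (le_trans (List.length_filter_le _ _) (Nat.le_of_eq List.length_attach))

def remove_similar_items_alt (lista : List String) : List String :=
  pvLoopB [] lista

-- ===== PRECONDITION & SPEC =====
def Spec_remove_similar_items (lista : List String) (out : List String) : Prop := out = remove_similar_items_alt lista
instance (lista : List String) (out : List String) : Decidable (Spec_remove_similar_items lista out) := by unfold Spec_remove_similar_items; infer_instance

-- ===== CLAIM (what is proved, stated in full; the proofs are below) =====
def Claim_equal_remove_similar_items : Prop := ∀ (lista : List String), Dom_remove_similar_items lista → Spec_remove_similar_items lista (remove_similar_items lista)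

-- ===== LEMMAS AND PROOFS =====

theorem pv_foldA_acc (l : List String) (res : List String) (om : PySem.Set String) :
    l.foldl pvStepA (res, om) =
      (res ++ (l.foldl pvStepA ([], om)).1, (l.foldl pvStepA ([], om)).2) := by
  induction l generalizing res om with
  | nil => simp
  | cons c t ih =>
    simp only [List.foldl_cons]
    by_cases h : PySem.Set.contains om (pvPre c) = true
    · have hm : pvPre c ∈ om := by simpa [PySem.Set.contains] using h
      have e1 : pvStepA (res, om) c = (res, om) := by simp [pvStepA]; exact hm
      have e2 : pvStepA ([], om) c = ([], om) := by simp [pvStepA]; exact hm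
      rw [e1, e2]; exact ih res om
    · have hm : pvPre c ∉ om := by simpa [PySem.Set.contains] using h
      have e1 : pvStepA (res, om) c = (res ++ [c], om.add (pvPre c)) := by
        simp [pvStepA]; exact hm
      have e2 : pvStepA ([], om) c = ([c], om.add (pvPre c)) := by
        simp [pvStepA]; exact hm
      rw [e1, e2, ih (res ++ [c]), ih [c]]
      simp

theorem pv_set_contains_add (s : PySem.Set String) (x p : String) :
    PySem.Set.contains (PySem.Set.add s x) p = (p == x || PySem.Set.contains s p) := by
  simp only [PySem.Set.add, PySem.Set.contains]
  by_cases hx : x ∈ s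
  · by_cases hp : p = x
    · simp [hx, hp]
    · simp [hx, hp]
  · by_cases hp : p = x
    · simp [hx, hp]
    · simp [hx, hp]

theorem pvLoopB_cons (res : List String) (c : String) (t : List String) :
    pvLoopB res (c :: t) = pvLoopB (res ++ [c]) (t.filter (fun x => pvPre x != pvPre c)) := by
  conv_lhs => unfold pvLoopB

theorem pvLoopB_nil (res : List String) : pvLoopB res [] = res := by
  unfold pvLoopB
  rfl

theorem pvLoopB_acc (n : ℕ) : ∀ (l : List String), l.length ≤ n →
    ∀ res, pvLoopB res l = res ++ pvLoopB [] l := by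
  induction n with
  | zero =>
    intro l hl res
    have : l = [] := List.length_eq_zero_iff.mp (Nat.le_zero.mp hl)
    subst this; simp [pvLoopB_nil]
  | succ n ih =>
    intro l hl res
    match l with
    | [] => simp [pvLoopB_nil]
    | c :: t =>
      rw [pvLoopB_cons, pvLoopB_cons, List.nil_append]
      have hlen : (t.filter (fun x => pvPre x != pvPre c)).length ≤ n := by
        have := List.length_filter_le (fun x => pvPre x != pvPre c) t
        simp at hl; omega
      rw [ih _ hlen (res ++ [c]), ih _ hlen [c]]
      simp

-- A's fold over l starting with forbidden set om = B's sieve over l with om's prefixes pre-filtered out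
theorem pv_key (n : ℕ) : ∀ (l : List String), l.length ≤ n → ∀ (om : PySem.Set String),
    (l.foldl pvStepA ([], om)).1 =
      pvLoopB [] (l.filter (fun c => !(PySem.Set.contains om (pvPre c)))) := by
  induction n with
  | zero =>
    intro l hl om
    have : l = [] := List.length_eq_zero_iff.mp (Nat.le_zero.mp hl)
    subst this; simp [pvLoopB_nil]
  | succ n ih =>
    intro l hl om
    match l with
    | [] => simp [pvLoopB_nil]
    | c :: t =>
      simp only [List.foldl_cons, List.filter_cons]
      by_cases h : PySem.Set.contains om (pvPre c) = true
      · have hm : pvPre c ∈ om := by simpa [PySem.Set.contains] using h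
        have e : pvStepA ([], om) c = ([], om) := by simp [pvStepA]; exact hm
        rw [e]
        simp only [h, Bool.not_true]
        rw [if_neg (by simp)]
        exact ih t (by simpa using Nat.le_of_succ_le_succ hl) om
      · have hm : pvPre c ∉ om := by simpa [PySem.Set.contains] using h
        have h' : PySem.Set.contains om (pvPre c) = false := by simpa using h
        have e : pvStepA ([], om) c = ([c], om.add (pvPre c)) := by
          simp [pvStepA]; exact hm
        rw [e, pv_foldA_acc t [c]]
        simp only [h', Bool.not_false]
        rw [if_pos trivial, pvLoopB_cons, List.nil_append]
        have ht : t.length ≤ n := by simpa using Nat.le_of_succ_le_succ hl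
        rw [ih t ht (om.add (pvPre c))]
        rw [pvLoopB_acc ((t.filter (fun x => !(PySem.Set.contains om (pvPre x)))).filter
              (fun x => pvPre x != pvPre c)).length _ le_rfl [c]]
        congr 2
        rw [List.filter_filter]
        apply List.filter_congr
        intro x _
        rw [pv_set_contains_add]
        cases hb : (pvPre x == pvPre c) <;> simp [hb]
        · intro _ hEq; rw [hEq] at hb; simp at hb
        · intro hne; exact absurd (eq_of_beq hb) hne

-- ===== VERDICT (by name: the statement is the Claim_ definition above) =====
theorem remove_similar_items_spec : Claim_equal_remove_similar_items := by
  intro lista _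
  unfold Spec_remove_similar_items remove_similar_items remove_similar_items_alt
  rw [pv_key lista.length lista le_rfl PySem.Set.empty]
  congr 1
  apply List.filter_eq_self.mpr
  intro x _
  simp [PySem.Set.contains, PySem.Set.empty]
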